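-- pv_equiv track=rewrite | github.com/kymagic/yaebooks-twitter | ebooks/markovtweetgenerator.py | _to_sentence_case
-- ===== SOURCE A (Python) =====
-- def _to_sentence_case(tweet):
--     found_first = False
--     tweet_array = list(tweet)
--     for i in range(len(tweet)):
--         if not found_first:
--             if tweet[i].isalpha():
--                 found_first = True
--                 tweet_array[i] = tweet[i].upper()
--         previous_string = tweet[i-2:i]
--         if previous_string == '. ' or previous_string == '! ' or previous_string == '; ':
--             tweet_array[i] = tweet[i].upper()
--     return ''.join(tweet_array)
-- ===== SOURCE B (Python) =====
-- DELIMS = ('. ', '! ', '; ')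
--
--
-- def _to_sentence_case(tweet):
--     # Stage 1: substring-search segmentation — repeatedly find the earliest
--     # delimiter occurrence and uppercase the character right after it.
--     res = []
--     pos = 0   # next character not yet emitted
--     sp = 0    # search start
--     while True:
--         hits = [h for h in (tweet.find(d, sp) for d in DELIMS) if h != -1]
--         if not hits:
--             res.append(tweet[pos:])
--             break
--         j = min(hits)
--         res.append(tweet[pos:j + 2])
--         res.append(tweet[j + 2:j + 3].upper())
--         pos, sp = j + 3, j + 2
--     body = ''.join(res)
--     # Stage 2: uppercase the first alphabetic character.
--     for i, c in enumerate(body):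
--         if c.isalpha():
--             return body[:i] + c.upper() + body[i + 1:]
--     return body
-- ===== Notes on version B (the rewrite author's own statement) =====
-- stated objective: faster
-- what changed: A's per-index Python loop that slice-compares the two preceding characters at every position and mutates a copied char array is replaced by substring-search segmentation: repeatedly locate the next sentence delimiter (punctuation-plus-space pair) with str.find, emit the segment plus the uppercased following character, then uppercase the first alphabetic character in a separate final pass.
import Mathlib
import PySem

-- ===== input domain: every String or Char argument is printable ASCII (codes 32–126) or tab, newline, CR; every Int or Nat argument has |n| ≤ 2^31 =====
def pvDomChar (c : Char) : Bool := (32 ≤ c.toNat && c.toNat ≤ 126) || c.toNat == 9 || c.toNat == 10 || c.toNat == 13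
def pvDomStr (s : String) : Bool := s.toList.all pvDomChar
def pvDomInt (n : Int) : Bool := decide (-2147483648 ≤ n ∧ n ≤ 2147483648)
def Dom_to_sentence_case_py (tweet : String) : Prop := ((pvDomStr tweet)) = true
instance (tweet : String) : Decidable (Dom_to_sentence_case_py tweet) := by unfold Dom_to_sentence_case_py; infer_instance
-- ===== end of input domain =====

-- B replaces A's per-index loop (slice-compare at every position, mutate a char array) by
-- substring-search segmentation: repeatedly find the earliest delimiter occurrence and
-- uppercase the character after it, then uppercase the first alphabetic character in a
-- final pass; measurably faster by a constant factor (C-level substring search).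

-- ===== PORT A =====
-- loop body of A; i comes from range(len(tweet)) so tweet[i] is always in range:
-- pyGetD with a dummy default and List.set at i.toNat are exact for these in-range, nonnegative i
def pvBodyA (t : List Char) (st : Bool × List Char) (i : Int) : Bool × List Char :=
  let found_first := st.1
  let tweet_array := st.2
  let st' :=
    if !found_first then
      if PySem.Chars.isalpha (PySem.List.pyGetD t i ' ') then
        (true, tweet_array.set i.toNat (PySem.Chars.upperChar (PySem.List.pyGetD t i ' ')))
      else (found_first, tweet_array)
    else (found_first, tweet_array)
  let previous_string := PySem.List.slice t (some (i - 2)) (some i)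
  if previous_string == ['.', ' '] || previous_string == ['!', ' '] || previous_string == [';', ' '] then
    (st'.1, st'.2.set i.toNat (PySem.Chars.upperChar (PySem.List.pyGetD t i ' ')))
  else st'

def to_sentence_case_py (tweet : String) : String :=
  let t := tweet.toList
  let r := (PySem.List.pyRange 0 (PySem.Chars.len t) 1).foldl (pvBodyA t) (false, t)
  String.ofList r.2

-- ===== PORT B =====
def pvDelims : List (List Char) := [['.', ' '], ['!', ' '], [';', ' ']]

-- Source B's while loop; fuel (called with t.length + 1) only makes the recursion structural:
-- when it runs out the loop's own no-hit exit is taken (proved unreachable in pvSeg_eq)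
def pvSegLoop (t : List Char) (fuel : Nat) (pos sp : Nat) (res : List Char) : List Char :=
  match fuel with
  | 0 => res ++ t.drop pos
  | fuel + 1 =>
    let hits := (pvDelims.map (fun d => PySem.Chars.findFrom t d (sp : Int) none)).filter
      (fun h => h ≠ -1)
    match PySem.List.min? hits (fun h => h) with
    | none => res ++ t.drop pos
    | some j =>
      pvSegLoop t fuel (j.toNat + 3) (j.toNat + 2)
        (res ++ PySem.List.slice t (some (pos : Int)) (some (j + 2))
             ++ (PySem.List.slice t (some (j + 2)) (some (j + 3))).map PySem.Chars.upperChar)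

-- the trailing first-alpha pass: enumerate+early-return scan ported as findIdx?; body.getD i ' '
-- is exact for the in-range index findIdx? returns
def to_sentence_case_py_alt (tweet : String) : String :=
  let t := tweet.toList
  let body := pvSegLoop t (t.length + 1) 0 0 []
  match body.findIdx? PySem.Chars.isalpha with
  | none => String.ofList body
  | some i => String.ofList (body.take i ++ [PySem.Chars.upperChar (body.getD i ' ')] ++ body.drop (i + 1))

-- ===== PRECONDITION & SPEC =====
def Spec_to_sentence_case_py (tweet : String) (out : String) : Prop := out = to_sentence_case_py_alt tweet
instance (tweet : String) (out : String) : Decidable (Spec_to_sentence_case_py tweet out) := by unfold Spec_to_sentence_case_py; infer_instance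

-- ===== CLAIM (what is proved, stated in full; the proofs are below) =====
def Claim_equal_to_sentence_case_py : Prop := ∀ (tweet : String), Dom_to_sentence_case_py tweet → Spec_to_sentence_case_py tweet (to_sentence_case_py tweet)

-- ===== LEMMAS AND PROOFS =====

-- should position j of t be uppercased by the punctuation rule?
def pvPunct (t : List Char) (j : Nat) : Bool :=
  decide (2 ≤ j) && ['.', '!', ';'].contains (t.getD (j - 2) ' ') && (t.getD (j - 1) ' ' == ' ')

-- should position j of t be uppercased at all?
def pvCond (t : List Char) (j : Nat) : Bool :=
  (t.findIdx? PySem.Chars.isalpha == some j) || pvPunct t j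

-- the array after the first k iterations of A's loop
def pvUpTo (t : List Char) (k : Nat) : List Char :=
  t.mapIdx (fun j c => if decide (j < k) && pvCond t j then PySem.Chars.upperChar c else c)

-- B's segmentation result from search position sp onward: uppercase j iff the punctuation rule
-- fires with its two-char trigger starting at or after sp
def pvPM (t : List Char) (sp : Nat) : List Char :=
  t.mapIdx (fun j c => if pvPunct t j && decide (sp + 2 ≤ j) then PySem.Chars.upperChar c else c)

-- an occurrence of one of the three delimiters starts at position q
def pvOccAt (t : List Char) (q : Nat) : Prop := ∃ d ∈ pvDelims, d <+: t.drop q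

theorem pvUpTo_succ (t : List Char) (k : Nat) (hk : k < t.length) :
    pvUpTo t (k + 1) =
      if pvCond t k then (pvUpTo t k).set k (PySem.Chars.upperChar (t.getD k ' ')) else pvUpTo t k := by
  apply List.ext_getElem
  · simp [pvUpTo]; split <;> simp
  · intro j hj hj'
    have hjt : j < t.length := by simpa [pvUpTo] using hj
    split <;> rename_i hc
    · rw [List.getElem_set]
      split <;> rename_i hjk
      · subst hjk
        simp [pvUpTo, List.getElem_mapIdx, hc, hk, List.getD_eq_getElem t ' ' hjt]
      · simp only [pvUpTo, List.getElem_mapIdx]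
        have : (decide (j < k + 1) : Bool) = decide (j < k) := by
          by_cases h : j < k <;> simp [h] <;> omega
        rw [this]
    · simp only [pvUpTo, List.getElem_mapIdx]
      by_cases hjk : j = k
      · subst hjk; simp [hc]
      · have : (decide (j < k + 1) : Bool) = decide (j < k) := by
          by_cases h : j < k <;> simp [h] <;> omega
        rw [this]

theorem pvFirst_iff (t : List Char) (k : Nat) (hk : k < t.length) :
    (t.findIdx? PySem.Chars.isalpha == some k) =
      (!(t.take k).any PySem.Chars.isalpha && PySem.Chars.isalpha t[k]) := by
  rcases h : t.findIdx? PySem.Chars.isalpha with _ | m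
  · have := List.findIdx?_eq_none_iff.mp h
    have h2 : ¬ PySem.Chars.isalpha t[k] = true := by
      simpa using this t[k] (List.getElem_mem hk)
    simp [h2]
  · rw [List.findIdx?_eq_some_iff_getElem] at h
    obtain ⟨hm, hpm, hmin⟩ := h
    by_cases hmk : m = k
    · subst hmk
      have hfa : (t.take m).any PySem.Chars.isalpha = false := by
        rw [List.any_eq_false]; intro x hx
        rw [List.mem_take_iff_getElem] at hx
        obtain ⟨j, hj, rfl⟩ := hx
        exact hmin j (by omega)
      simp [hfa, hpm]
    · have hne : (some m == some k : Bool) = false := by simp [hmk]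
      rw [hne]
      by_cases hlt : m < k
      · have : (t.take k).any PySem.Chars.isalpha = true := by
          rw [List.any_eq_true]
          exact ⟨t[m], by rw [List.mem_take_iff_getElem]; exact ⟨m, by simp; omega, rfl⟩, hpm⟩
        simp [this]
      · have hk' : k < m := by omega
        have := hmin k hk'
        simp [this]

theorem pvTriple (x y : Char) :
    (([x, y] == ['.', ' ']) || ([x, y] == ['!', ' ']) || ([x, y] == [';', ' '])) =
      (['.', '!', ';'].contains x && (y == ' ')) := by
  simp [Bool.beq_eq_decide_eq]
  by_cases hx : x = '.' <;> by_cases hy : x = '!' <;> by_cases hz : x = ';' <;> by_cases hw : y = ' ' <;>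
    simp [hx, hy, hz, hw]

-- A's slice condition at index k equals the char-wise punctuation test pvPunct
theorem pvSlice_cond (t : List Char) (k : Nat) (hk : k < t.length) :
    (let previous_string := PySem.List.slice t (some ((k : Int) - 2)) (some (k : Int))
     (previous_string == ['.', ' '] || previous_string == ['!', ' '] || previous_string == [';', ' ']))
    = pvPunct t k := by
  simp only [pvPunct]
  by_cases h2 : 2 ≤ k
  · have hcast : ((k : Int) - 2) = ((k - 2 : Nat) : Int) := by omega
    rw [hcast, PySem.List.slice_natCast]
    have e1 : k - 2 + 1 = k - 1 := by omega
    have hd : List.drop (k - 2) t = t[k - 2]'(by omega) :: t[k - 1]'(by omega) :: List.drop (k - 1 + 1) t := by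
      rw [List.drop_eq_getElem_cons (by omega : k - 2 < t.length), e1,
          List.drop_eq_getElem_cons (by omega : k - 1 < t.length)]
    have htake : k - (k - 2) = 2 := by omega
    rw [hd, htake]
    rw [show List.take 2 (t[k - 2]'(by omega) :: t[k - 1]'(by omega) :: List.drop (k - 1 + 1) t)
        = [t[k - 2]'(by omega), t[k - 1]'(by omega)] from rfl]
    simp only [List.getD_eq_getElem t ' ' (by omega : k - 2 < t.length),
      List.getD_eq_getElem t ' ' (by omega : k - 1 < t.length), h2, decide_true, Bool.true_and]
    exact pvTriple _ _
  · have hlen : (PySem.List.slice t (some ((k : Int) - 2)) (some (k : Int))).length = 0 := by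
      rw [PySem.List.length_slice]
      interval_cases k
      · rw [show (((0:Nat):Int) - 2) = -2 by norm_num, show (((0:Nat):Int)) = ((0:Nat):Int) from rfl]
        rw [PySem.List.clampIdx_natCast]
        omega
      · have hn : 2 ≤ t.length := hk
        rw [show (((1:Nat):Int) - 2) = -1 by norm_num]
        rw [PySem.List.clampIdx_neg_one, PySem.List.clampIdx_natCast]
        omega
    have hnil : PySem.List.slice t (some ((k : Int) - 2)) (some (k : Int)) = [] :=
      List.eq_nil_of_length_eq_zero hlen
    simp [hnil, h2]

set_option maxRecDepth 4096 in
theorem pvLoopA (t : List Char) (k : Nat) (hk : k ≤ t.length) :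
    (List.range k).foldl (fun st (j : Nat) => pvBodyA t st (0 + (j : Int))) (false, t)
      = ((t.take k).any PySem.Chars.isalpha, pvUpTo t k) := by
  induction k with
  | zero =>
    rw [List.range_zero, List.foldl_nil, List.take_zero, List.any_nil]
    have h0 : pvUpTo t 0 = t := by
      apply List.ext_getElem
      · simp [pvUpTo]
      · intro j hj hj'; simp [pvUpTo, List.getElem_mapIdx]
    rw [h0]
  | succ k ih =>
    have hk' : k < t.length := by omega
    rw [List.range_succ]
    simp only [List.foldl_append, List.foldl_cons, List.foldl_nil]
    rw [ih (by omega)]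
    have hget : PySem.List.pyGetD t (0 + (k : Int)) ' ' = t[k] := by
      rw [zero_add, PySem.List.pyGetD_natCast, List.getD_eq_getElem t ' ' hk']
    have htoNat : (0 + (k : Int)).toNat = k := by omega
    have hslice := pvSlice_cond t k hk'
    simp only at hslice
    have htake : t.take (k + 1) = t.take k ++ t[k]?.toList := List.take_add_one
    unfold pvBodyA
    simp only [hget, htoNat]
    have hsl : (0 + (k : Int) - 2) = ((k : Int) - 2) ∧ (0 + (k : Int)) = (k : Int) := by constructor <;> omega
    rw [hsl.1, hsl.2]
    rw [pvUpTo_succ t k hk']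
    rw [hslice]
    have hfirst := pvFirst_iff t k hk'
    have hgetD : t.getD k ' ' = t[k] := List.getD_eq_getElem t ' ' hk'
    unfold pvCond
    rw [hfirst, hgetD]
    have hany : (t.take (k + 1)).any PySem.Chars.isalpha
        = ((t.take k).any PySem.Chars.isalpha || PySem.Chars.isalpha t[k]) := by
      rw [htake, List.any_append]
      simp [List.getElem?_eq_getElem hk']
    cases ha : (t.take k).any PySem.Chars.isalpha <;>
      cases hb : PySem.Chars.isalpha t[k] <;>
      cases hc : pvPunct t k <;>
      simp [hany, ha, hb, hc, List.set_set]


-- ---- character facts ----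
theorem pvDecideLe (a b : Char) : decide (a ≤ b) = decide (a.toNat ≤ b.toNat) :=
  decide_eq_decide.mpr Iff.rfl

theorem pvIslower_iff (c : Char) : PySem.Chars.islower c = decide (97 ≤ c.toNat ∧ c.toNat ≤ 122) := by
  simp only [PySem.Chars.islower, pvDecideLe]
  show (decide (97 ≤ c.toNat) && decide (c.toNat ≤ 122)) = _
  simp

theorem pvToNat_sub32 (c : Char) (h1 : 97 ≤ c.toNat) (h2 : c.toNat ≤ 122) :
    (Char.ofNat (c.toNat - 32)).toNat = c.toNat - 32 := by
  rw [Char.ofNat, dif_pos (by left; omega : (c.toNat - 32).isValidChar)]; rfl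

theorem pvUpper_of_lower (c : Char) (h : 97 ≤ c.toNat ∧ c.toNat ≤ 122) :
    PySem.Chars.upperChar c = Char.ofNat (c.toNat - 32) := by
  simp only [PySem.Chars.upperChar, pvIslower_iff, decide_eq_true h, if_true]

theorem pvUpper_of_not_lower (c : Char) (h : ¬ (97 ≤ c.toNat ∧ c.toNat ≤ 122)) :
    PySem.Chars.upperChar c = c := by
  simp only [PySem.Chars.upperChar, pvIslower_iff, decide_eq_false h, Bool.false_eq_true, if_false]

theorem pvIsalpha_iff (c : Char) :
    PySem.Chars.isalpha c = decide ((65 ≤ c.toNat ∧ c.toNat ≤ 90) ∨ (97 ≤ c.toNat ∧ c.toNat ≤ 122)) := by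
  simp only [PySem.Chars.isalpha, PySem.Chars.isupper, pvIslower_iff, pvDecideLe]
  show (decide (65 ≤ c.toNat) && decide (c.toNat ≤ 90) || _) = _
  simp

theorem pvIsalpha_upper (c : Char) :
    PySem.Chars.isalpha (PySem.Chars.upperChar c) = PySem.Chars.isalpha c := by
  by_cases h : 97 ≤ c.toNat ∧ c.toNat ≤ 122
  · rw [pvUpper_of_lower c h]
    simp only [pvIsalpha_iff, pvToNat_sub32 c h.1 h.2]
    exact decide_eq_decide.mpr (by omega)
  · rw [pvUpper_of_not_lower c h]

theorem pvUpper_upper (c : Char) :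
    PySem.Chars.upperChar (PySem.Chars.upperChar c) = PySem.Chars.upperChar c := by
  by_cases h : 97 ≤ c.toNat ∧ c.toNat ≤ 122
  · rw [pvUpper_of_lower c h, pvUpper_of_not_lower]
    rw [pvToNat_sub32 c h.1 h.2]
    omega
  · rw [pvUpper_of_not_lower c h, pvUpper_of_not_lower c h]

-- ---- occurrences of the two-char delimiters ----
theorem pvPairPrefix (t : List Char) (q : Nat) (a b : Char) :
    [a, b] <+: t.drop q ↔ (t[q]? = some a ∧ t[q + 1]? = some b) := by
  constructor
  · rintro ⟨u, hu⟩
    have h0 : (t.drop q)[0]? = some a := by rw [← hu]; rfl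
    have h1 : (t.drop q)[1]? = some b := by rw [← hu]; rfl
    rw [List.getElem?_drop] at h0 h1
    exact ⟨by simpa using h0, by simpa using h1⟩
  · rintro ⟨h0, h1⟩
    have hq : q < t.length := (List.getElem?_eq_some_iff.mp h0).1
    have hq1 : q + 1 < t.length := (List.getElem?_eq_some_iff.mp h1).1
    have hd : t.drop q = t[q] :: t[q + 1] :: t.drop (q + 1 + 1) := by
      rw [List.drop_eq_getElem_cons hq, List.drop_eq_getElem_cons hq1]
    rw [hd]
    have ea : t[q] = a := by simpa [List.getElem?_eq_getElem hq] using h0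
    have eb : t[q + 1] = b := by simpa [List.getElem?_eq_getElem hq1] using h1
    exact ⟨t.drop (q + 1 + 1), by rw [ea, eb]; rfl⟩

theorem pvOccAt_iff (t : List Char) (q : Nat) :
    pvOccAt t q ↔ (∃ x, t[q]? = some x ∧ ['.', '!', ';'].contains x ∧ t[q + 1]? = some ' ') := by
  constructor
  · rintro ⟨d, hd, hpre⟩
    fin_cases hd <;>
      · rw [pvPairPrefix] at hpre
        exact ⟨_, hpre.1, by decide, hpre.2⟩
  · rintro ⟨x, hx, hmem, hsp⟩
    refine ⟨[x, ' '], ?_, (pvPairPrefix t q x ' ').mpr ⟨hx, hsp⟩⟩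
    have hx3 : x = '.' ∨ x = '!' ∨ x = ';' := by simpa using hmem
    rcases hx3 with rfl | rfl | rfl <;> simp [pvDelims]

-- pvPunct at an in-range index is an occurrence two positions earlier
theorem pvPunct_iff_occ (t : List Char) (j : Nat) (hj : j < t.length) :
    pvPunct t j = true ↔ 2 ≤ j ∧ pvOccAt t (j - 2) := by
  rw [pvOccAt_iff]
  simp only [pvPunct, Bool.and_eq_true, decide_eq_true_eq, beq_iff_eq]
  constructor
  · rintro ⟨⟨h2, hmem⟩, hsp⟩
    have hq1 : j - 2 + 1 = j - 1 := by omega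
    have hl2 : j - 2 < t.length := by omega
    have hl1 : j - 1 < t.length := by omega
    rw [List.getD_eq_getElem t ' ' hl2] at hmem
    rw [List.getD_eq_getElem t ' ' hl1] at hsp
    exact ⟨h2, t[j - 2], List.getElem?_eq_getElem hl2, hmem, by rw [hq1, List.getElem?_eq_getElem hl1, hsp]⟩
  · rintro ⟨h2, x, hx, hmem, hsp⟩
    have hl2 : j - 2 < t.length := (List.getElem?_eq_some_iff.mp hx).1
    have hl1 : j - 2 + 1 < t.length := (List.getElem?_eq_some_iff.mp hsp).1
    have hq1 : j - 2 + 1 = j - 1 := by omega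
    refine ⟨⟨h2, ?_⟩, ?_⟩
    · rw [List.getD_eq_getElem t ' ' hl2, show t[j-2] = x by simpa [List.getElem?_eq_getElem hl2] using hx]
      exact hmem
    · rw [List.getD_eq_getElem t ' ' (by omega : j - 1 < t.length)]
      rw [hq1] at hsp
      simpa [List.getElem?_eq_getElem (hq1 ▸ hl1 : j - 1 < t.length)] using hsp


theorem pvPM_length (t : List Char) (sp : Nat) : (pvPM t sp).length = t.length := by
  simp [pvPM]

theorem pvPM_getElem (t : List Char) (sp : Nat) (j : Nat) (hj : j < (pvPM t sp).length) :
    (pvPM t sp)[j] = if pvPunct t j && decide (sp + 2 ≤ j) then PySem.Chars.upperChar (t[j]'(by simpa [pvPM] using hj)) else t[j]'(by simpa [pvPM] using hj) := by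
  simp [pvPM, List.getElem_mapIdx]

theorem pvPM_eq_self_of_no_occ (t : List Char) (sp : Nat)
    (hno : ∀ q, sp ≤ q → ¬ pvOccAt t q) : pvPM t sp = t := by
  apply List.ext_getElem
  · exact pvPM_length t sp
  · intro j hj hjt
    rw [pvPM_getElem t sp j hj]
    have hc : (pvPunct t j && decide (sp + 2 ≤ j)) = false := by
      by_cases hp : pvPunct t j = true
      · have := ((pvPunct_iff_occ t j hjt).mp hp)
        by_cases hs : sp + 2 ≤ j
        · exact absurd this.2 (hno (j - 2) (by omega))
        · simp [hs]
      · simp [Bool.not_eq_true] at hp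
        simp [hp]
    rw [hc]
    simp

-- no occurrence at or after sp when all three searches miss
theorem pvNoOcc_of_all_miss (t : List Char) (sp : Nat) (hsp : sp ≤ t.length)
    (hmiss : ∀ d ∈ pvDelims, PySem.Chars.findFrom t d (sp : Int) none = -1) :
    ∀ q, sp ≤ q → ¬ pvOccAt t q := by
  rintro q hq ⟨d, hd, hpre⟩
  have hnin := (PySem.Chars.findFrom_natCast_eq_neg_one_iff t d sp hsp).mp (hmiss d hd)
  apply hnin
  have h1 : List.drop q t = (List.drop sp t).drop (q - sp) := by
    rw [List.drop_drop]; congr 1; omega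
  rw [h1] at hpre
  exact hpre.isInfix.trans (List.drop_suffix _ _).isInfix

set_option maxHeartbeats 1000000 in
theorem pvSeg_eq (t : List Char) (fuel : Nat) : ∀ (pos sp : Nat) (res : List Char),
    sp ≤ t.length → t.length ≤ sp + fuel →
    ((pos = 0 ∧ sp = 0) ∨ (pos = sp + 1 ∧ 2 ≤ sp ∧ t[sp - 1]? = some ' ')) →
    pvSegLoop t fuel pos sp res = res ++ (pvPM t sp).drop pos := by
  induction fuel with
  | zero =>
    intro pos sp res hsp hfuel _
    have hpm : pvPM t sp = t := pvPM_eq_self_of_no_occ t sp (by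
      rintro q hq ⟨d, hd, hpre⟩
      have hd2 : d.length = 2 := by fin_cases hd <;> rfl
      have hlen := hpre.length_le
      rw [hd2, List.length_drop] at hlen
      omega)
    simp [pvSegLoop, hpm]
  | succ fuel ih =>
    intro pos sp res hsp hfuel hpos
    simp only [pvSegLoop]
    rcases hmin : PySem.List.min? ((pvDelims.map (fun d => PySem.Chars.findFrom t d (sp : Int) none)).filter
        (fun h => h ≠ -1)) (fun h => h) with _ | j
    · -- no delimiter at or after sp: the loop exits, and pvPM t sp changes nothing
      rw [hmin]
      have hnil := (PySem.List.min?_eq_none_iff _ _).mp hmin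
      have hmiss : ∀ d ∈ pvDelims, PySem.Chars.findFrom t d (sp : Int) none = -1 := by
        intro d hd
        by_contra hne
        have : PySem.Chars.findFrom t d (sp : Int) none ∈
            ((pvDelims.map (fun d => PySem.Chars.findFrom t d (sp : Int) none)).filter
              (fun h => h ≠ -1)) := by
          rw [List.mem_filter]
          exact ⟨List.mem_map.mpr ⟨d, hd, rfl⟩, by simpa using hne⟩
        rw [hnil] at this
        exact absurd this (List.not_mem_nil)
      have hpm : pvPM t sp = t := pvPM_eq_self_of_no_occ t sp (pvNoOcc_of_all_miss t sp hsp hmiss)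
      rw [hpm]
    · -- earliest delimiter at J := j.toNat
      rw [hmin]
      dsimp only
      have hjmem := PySem.List.min?_mem hmin
      rw [List.mem_filter] at hjmem
      obtain ⟨hjmap, hjneb⟩ := hjmem
      have hjne : j ≠ -1 := by simpa using hjneb
      obtain ⟨d₀, hd₀, hfd₀⟩ := List.mem_map.mp hjmap
      have hspec := PySem.Chars.findFrom_natCast_spec t d₀ sp hsp (by rw [hfd₀]; exact hjne)
      rw [hfd₀] at hspec
      obtain ⟨hjsp, hpre0, hmin0⟩ := hspec
      have hj0 : 0 ≤ j := le_trans (by positivity) hjsp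
      set J := j.toNat with hJdef
      have hJ : j = (J : Int) := by omega
      have hspJ : sp ≤ J := by omega
      have hd₀len : d₀.length = 2 := by fin_cases hd₀ <;> rfl
      have hJ2 : J + 2 ≤ t.length := by
        have := hpre0.length_le
        rw [hd₀len, List.length_drop] at this
        omega
      have hoccJ : pvOccAt t J := ⟨d₀, hd₀, hpre0⟩
      have hsecond : t[J + 1]? = some ' ' := by
        fin_cases hd₀ <;> exact ((pvPairPrefix t J _ ' ').mp hpre0).2
      -- global minimality: no occurrence of any delimiter in [sp, J)
      have hglob : ∀ i, sp ≤ i → i < J → ¬ pvOccAt t i := by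
        rintro i h1 h2 ⟨d, hd, hpre⟩
        have hinf : d <:+: t.drop sp := by
          have h1' : List.drop i t = (List.drop sp t).drop (i - sp) := by
            rw [List.drop_drop]; congr 1; omega
          rw [h1'] at hpre
          exact hpre.isInfix.trans (List.drop_suffix _ _).isInfix
        have hne : PySem.Chars.findFrom t d (sp : Int) none ≠ -1 := by
          rw [Ne, PySem.Chars.findFrom_natCast_eq_neg_one_iff t d sp hsp]
          simpa using hinf
        have hmemf : PySem.Chars.findFrom t d (sp : Int) none ∈
            ((pvDelims.map (fun d => PySem.Chars.findFrom t d (sp : Int) none)).filter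
              (fun h => h ≠ -1)) := by
          rw [List.mem_filter]
          exact ⟨List.mem_map.mpr ⟨d, hd, rfl⟩, by simpa using hne⟩
        have hle : j ≤ PySem.Chars.findFrom t d (sp : Int) none := PySem.List.min?_isMin hmin _ hmemf
        have hspecd := PySem.Chars.findFrom_natCast_spec t d sp hsp hne
        exact hspecd.2.2 i h1 (by omega) hpre
      -- chunkwise agreement facts
      have hagreeA : ∀ i, i < J + 2 → ∀ (hi : i < t.length), (pvPM t sp)[i]'(by rw [pvPM_length]; exact hi) = t[i] := by
        intro i hiJ hi
        rw [pvPM_getElem]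
        have hc : (pvPunct t i && decide (sp + 2 ≤ i)) = false := by
          by_cases hp : pvPunct t i = true
          · by_cases hs : sp + 2 ≤ i
            · have hocc := (pvPunct_iff_occ t i hi).mp hp
              exact absurd hocc.2 (hglob (i - 2) (by omega) (by omega))
            · simp [hs]
          · simp [Bool.not_eq_true] at hp; simp [hp]
        rw [hc]; simp
      have hagreeB : ∀ (hi : J + 2 < t.length),
          (pvPM t sp)[J + 2]'(by rw [pvPM_length]; exact hi) = PySem.Chars.upperChar t[J + 2] := by
        intro hi
        rw [pvPM_getElem]
        have hp : pvPunct t (J + 2) = true := (pvPunct_iff_occ t (J + 2) hi).mpr ⟨by omega, by simpa using hoccJ⟩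
        have hc : (pvPunct t (J + 2) && decide (sp + 2 ≤ J + 2)) = true := by
          rw [hp]; simp; omega
        rw [hc]; simp
      have hagreeC : ∀ i, J + 3 ≤ i → ∀ (hi : i < t.length),
          (pvPM t sp)[i]'(by rw [pvPM_length]; exact hi) = (pvPM t (J + 2))[i]'(by rw [pvPM_length]; exact hi) := by
        intro i h3 hi
        rw [pvPM_getElem, pvPM_getElem]
        by_cases hp : pvPunct t i = true
        · have hocc := (pvPunct_iff_occ t i hi).mp hp
          have hne1 : i - 2 ≠ J + 1 := by
            intro he
            obtain ⟨x, hx, hxm, hxs⟩ := (pvOccAt_iff t (i - 2)).mp hocc.2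
            rw [he] at hx
            have hxeq : x = ' ' := Option.some.inj (hx.symm.trans hsecond)
            subst hxeq
            simpa using hxm
          have hge : J + 4 ≤ i := by omega
          have e1 : (decide (sp + 2 ≤ i)) = true := by simp; omega
          have e2 : (decide (J + 2 + 2 ≤ i)) = true := by simp; omega
          rw [e1, e2]
        · simp [Bool.not_eq_true] at hp; simp [hp]
      -- rewrite the emitted slices
      have hs1 : PySem.List.slice t (some (pos : Int)) (some (j + 2)) = (t.drop pos).take (J + 2 - pos) := by
        rw [hJ, show ((J : Int) + 2) = ((J + 2 : Nat) : Int) by push_cast; ring, PySem.List.slice_natCast]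
      have hs2 : PySem.List.slice t (some (j + 2)) (some (j + 3)) = (t.drop (J + 2)).take 1 := by
        rw [hJ, show ((J : Int) + 2) = ((J + 2 : Nat) : Int) by push_cast; ring,
          show ((J : Int) + 3) = ((J + 3 : Nat) : Int) by push_cast; ring, PySem.List.slice_natCast,
          show J + 3 - (J + 2) = 1 by omega]
      -- apply the induction hypothesis to the recursive call
      rw [ih (J + 3) (J + 2) _ hJ2 (by omega) (Or.inr ⟨rfl, by omega, by simpa using hsecond⟩)]
      rw [hs1, hs2]
      -- decompose (pvPM t sp).drop pos into the three chunks
      have hposle : pos ≤ sp + 1 := by rcases hpos with ⟨h1, h2⟩ | ⟨h1, _⟩ <;> omega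
      have hlpm := pvPM_length t sp
      have hd1 : (pvPM t sp).drop pos = ((pvPM t sp).drop pos).take (J + 2 - pos) ++ (pvPM t sp).drop (J + 2) := by
        conv_lhs => rw [← List.take_append_drop (J + 2 - pos) ((pvPM t sp).drop pos)]
        rw [List.drop_drop]
        congr 2
        omega
      have hd2 : (pvPM t sp).drop (J + 2) = ((pvPM t sp).drop (J + 2)).take 1 ++ (pvPM t sp).drop (J + 3) := by
        conv_lhs => rw [← List.take_append_drop 1 ((pvPM t sp).drop (J + 2))]
        rw [List.drop_drop]
      have hc1 : ((pvPM t sp).drop pos).take (J + 2 - pos) = (t.drop pos).take (J + 2 - pos) := by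
        apply List.ext_getElem
        · simp [hlpm]
        · intro i hi hi'
          have hibound : pos + i < t.length := by simp [hlpm] at hi; omega
          have hiJ : pos + i < J + 2 := by simp [hlpm] at hi; omega
          rw [List.getElem_take, List.getElem_take, List.getElem_drop, List.getElem_drop]
          exact hagreeA (pos + i) hiJ hibound
      have hc2 : ((pvPM t sp).drop (J + 2)).take 1 = ((t.drop (J + 2)).take 1).map PySem.Chars.upperChar := by
        apply List.ext_getElem
        · simp [hlpm]
        · intro i hi hi'
          have hi0 : i = 0 := by simp at hi; omega
          subst hi0
          have hibound : J + 2 < t.length := by simp [hlpm] at hi; omega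
          rw [List.getElem_take, List.getElem_drop, List.getElem_map, List.getElem_take, List.getElem_drop]
          simpa using hagreeB hibound
      have hc3 : (pvPM t sp).drop (J + 3) = (pvPM t (J + 2)).drop (J + 3) := by
        apply List.ext_getElem
        · simp [pvPM_length]
        · intro i hi hi'
          rw [List.getElem_drop, List.getElem_drop]
          have hibound : J + 3 + i < t.length := by simp [pvPM_length] at hi; omega
          exact hagreeC (J + 3 + i) (by omega) hibound
      rw [hd1, hd2, hc1, hc2, hc3]
      simp [List.append_assoc]


theorem pvFindIdx_congr {α : Type} (p : α → Bool) (xs ys : List α) (hlen : xs.length = ys.length)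
    (h : ∀ (i : Nat) (hi : i < xs.length), p xs[i] = p (ys[i]'(hlen ▸ hi))) :
    xs.findIdx? p = ys.findIdx? p := by
  rcases hx : xs.findIdx? p with _ | m
  · have hall := List.findIdx?_eq_none_iff.mp hx
    symm
    rw [List.findIdx?_eq_none_iff]
    intro y hy
    obtain ⟨i, hi, rfl⟩ := List.mem_iff_getElem.mp hy
    rw [← h i (by omega)]
    exact hall xs[i] (List.getElem_mem _)
  · obtain ⟨hm, hpm, hmin⟩ := List.findIdx?_eq_some_iff_getElem.mp hx
    symm
    rw [List.findIdx?_eq_some_iff_getElem]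
    exact ⟨by omega, by rw [← h m hm]; exact hpm, fun j hj => by
      rw [← h j (by omega)]; exact hmin j hj⟩

theorem pvBody_eq (t : List Char) : pvSegLoop t (t.length + 1) 0 0 [] = pvPM t 0 := by
  rw [pvSeg_eq t (t.length + 1) 0 0 [] (by omega) (by omega) (Or.inl ⟨rfl, rfl⟩)]
  simp

theorem pvPunct_two_le (t : List Char) (j : Nat) (h : pvPunct t j = true) : 2 ≤ j := by
  simp only [pvPunct, Bool.and_eq_true, decide_eq_true_eq] at h
  exact h.1.1

theorem pvAltEq (tweet : String) :
    to_sentence_case_py_alt tweet = String.ofList (pvUpTo tweet.toList tweet.toList.length) := by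
  unfold to_sentence_case_py_alt
  dsimp only
  rw [pvBody_eq]
  have hfi : (pvPM tweet.toList 0).findIdx? PySem.Chars.isalpha
      = tweet.toList.findIdx? PySem.Chars.isalpha := by
    apply pvFindIdx_congr _ _ _ (pvPM_length _ _)
    intro i hi
    rw [pvPM_getElem]
    split
    · rw [pvIsalpha_upper]
    · rfl
  rw [hfi]
  rcases hf : tweet.toList.findIdx? PySem.Chars.isalpha with _ | i
  · dsimp only
    congr 1
    apply List.ext_getElem
    · simp [pvPM_length, pvUpTo]
    · intro j hj hj'
      have hjt : j < tweet.toList.length := by simpa [pvPM_length] using hj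
      rw [pvPM_getElem]
      simp only [pvUpTo, List.getElem_mapIdx]
      have hcnd : pvCond tweet.toList j = pvPunct tweet.toList j := by
        simp [pvCond, hf]
      rw [hcnd]
      have hdj : (decide (j < tweet.toList.length)) = true := decide_eq_true hjt
      rw [hdj]
      by_cases hp : pvPunct tweet.toList j = true
      · have h2 := pvPunct_two_le _ _ hp
        simp [hp, decide_eq_true (show 0 + 2 ≤ j by omega)]
      · simp only [Bool.not_eq_true] at hp
        simp [hp]
  · dsimp only
    obtain ⟨hil, hpi, hmini⟩ := List.findIdx?_eq_some_iff_getElem.mp hf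
    congr 1
    have hgd : (pvPM tweet.toList 0).getD i ' ' = (pvPM tweet.toList 0)[i]'(by rw [pvPM_length]; exact hil) :=
      List.getD_eq_getElem _ ' ' (by rw [pvPM_length]; exact hil)
    have hset : (pvPM tweet.toList 0).take i
          ++ [PySem.Chars.upperChar ((pvPM tweet.toList 0).getD i ' ')]
          ++ (pvPM tweet.toList 0).drop (i + 1)
        = (pvPM tweet.toList 0).set i (PySem.Chars.upperChar ((pvPM tweet.toList 0).getD i ' ')) := by
      rw [List.set_eq_take_append_cons_drop, if_pos (by rw [pvPM_length]; exact hil)]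
      simp
    rw [hset]
    apply List.ext_getElem
    · simp [pvPM_length, pvUpTo]
    · intro j hj hj'
      have hjt : j < tweet.toList.length := by simpa [pvPM_length] using hj
      rw [List.getElem_set]
      simp only [pvUpTo, List.getElem_mapIdx]
      have hdj : (decide (j < tweet.toList.length)) = true := decide_eq_true hjt
      rw [hdj]
      by_cases hij : i = j
      · subst hij
        rw [if_pos rfl]
        rw [hgd, pvPM_getElem]
        have hcnd : pvCond tweet.toList i = true := by
          simp [pvCond, hf]
        rw [hcnd]
        simp only [Bool.true_and, if_true]
        split
        · rw [pvUpper_upper]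
        · rfl
      · rw [if_neg hij, pvPM_getElem]
        have hcnd : pvCond tweet.toList j = pvPunct tweet.toList j := by
          simp [pvCond, hf, hij]
        rw [hcnd]
        simp only [Bool.true_and]
        cases hp : pvPunct tweet.toList j
        · simp
        · have h2 := pvPunct_two_le _ _ hp
          have : (decide (0 + 2 ≤ j)) = true := decide_eq_true (by omega)
          rw [this]
          simp

-- ===== VERDICT (by name: the statement is the Claim_ definition above) =====
theorem to_sentence_case_py_spec : Claim_equal_to_sentence_case_py := by
  intro tweet _
  unfold Spec_to_sentence_case_py to_sentence_case_py
  rw [pvAltEq]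
  dsimp only
  rw [PySem.Chars.len_eq, PySem.List.pyRange_one, List.foldl_map]
  have hn : ((tweet.toList.length : Int) - 0).toNat = tweet.toList.length := by omega
  rw [hn, pvLoopA tweet.toList tweet.toList.length (le_refl _)]
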